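-- pv_equiv track=rewrite | github.com/Lanver123/CompeticionProgramacion | Wheres_Waldorf_10010/waldorf.py | build_diag_grid2
-- ===== SOURCE A (Python) =====
-- def build_diag_grid2(grid):
--     offset = [0]*(len(grid[0])-1)
--     aux_grid = [line+offset for line in grid]
--     diag_grid = []
--     for i, line in enumerate(aux_grid):
--         for _ in range(i):
--             line = [line.pop()] + line
--         diag_grid.append(line)
--
--     diag_grid = [(list(line)) for line in zip(*diag_grid)]
--     diag_grid = [[elem for elem in line if elem != 0] for line in diag_grid]
--     return diag_grid
-- ===== SOURCE B (Python) =====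
-- def build_diag_grid2(grid):
--     C = len(grid[0])
--     pad = max(C - 1, 0)
--     lens = [len(row) + pad for row in grid]
--     M = min(lens)
--     out = []
--     for k in range(M):
--         diag = []
--         for i, row in enumerate(grid):
--             j = (k - i) % lens[i]
--             if j < len(row):
--                 diag.append(row[j])
--         out.append(diag)
--     return out
-- ===== Notes on version B (the rewrite author's own statement) =====
-- stated objective: alternative
-- what changed: B computes each diagonal directly by modular index arithmetic (source column j = (k - i) % lens[i], skipping padding positions) instead of A's pipeline of padding every row with zeros, rotating each row i times by pop-and-prepend, transposing with zip and filtering out the zeros.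
-- outside the precondition, e.g. on build_diag_grid2([]): A raises IndexError, B raises IndexError
-- crash fix: On a nonempty grid whose first row has at most one cell while some later row is empty, A raises IndexError (line.pop() from an empty list); B returns []. — e.g. on build_diag_grid2([["a"], []]): A raises IndexError, B returns []
import Mathlib
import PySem

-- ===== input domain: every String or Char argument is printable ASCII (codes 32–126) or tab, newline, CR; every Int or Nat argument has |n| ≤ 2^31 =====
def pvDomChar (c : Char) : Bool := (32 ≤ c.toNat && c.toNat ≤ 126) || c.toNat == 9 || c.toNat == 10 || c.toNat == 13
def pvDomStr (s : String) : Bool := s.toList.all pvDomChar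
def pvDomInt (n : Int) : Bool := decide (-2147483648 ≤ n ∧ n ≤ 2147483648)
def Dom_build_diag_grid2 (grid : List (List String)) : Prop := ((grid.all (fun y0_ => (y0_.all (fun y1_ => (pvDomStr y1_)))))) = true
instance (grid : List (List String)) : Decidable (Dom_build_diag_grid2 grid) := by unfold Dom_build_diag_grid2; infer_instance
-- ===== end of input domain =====

-- B replaces A's pad/rotate/zip/filter pipeline by indexing each diagonal directly with modular
-- arithmetic ('alternative' objective); return-value equivalence, neither version mutates its argument.

-- ===== PORT A =====
-- A mixes string cells with int-0 padding in one row; that union type is encoded as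
-- Option String (some = string cell, none = the 0 padding), so 'elem != 0' keeps exactly the somes.
-- grid[0] on the empty grid raises IndexError in Python (excluded by Pre_).
def pvPad (c : Nat) (row : List String) : List (Option String) :=
  row.map some ++ List.replicate (c - 1) none

-- one step of A's inner loop: line = [line.pop()] + line (pop on [] raises; Pre_ excludes reaching it)
def pvRot1 {α : Type} (l : List α) : List α :=
  match l.getLast? with
  | none => l
  | some x => x :: l.dropLast

-- exact semantics of Python's zip(*rows): truncate to the shortest row; for k below the
-- minimum length every rows[i][k] exists, so filterMap collects exactly those cells in order.
def pvZipStar {α : Type} (rows : List (List α)) : List (List α) :=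
  match (rows.map List.length).min? with
  | none => []
  | some M => (List.range M).map (fun k => rows.filterMap (fun r => r[k]?))

def build_diag_grid2 (grid : List (List String)) : List (List String) :=
  let C := (grid.headD []).length
  let aux := grid.map (pvPad C)
  let diagRows := (PySem.List.enumerate aux).map (fun p => pvRot1^[p.1.toNat] p.2)
  let trans := pvZipStar diagRows
  trans.map (fun line => line.filterMap id)

-- ===== PORT B =====
-- Source B guarantees 0 ≤ j < lens[i] before reading row[j]; that in-range access is p.2[j.toNat]?
-- inside the filterMap (the if-guard is Source B's 'if j < len(row)').
def build_diag_grid2_alt (grid : List (List String)) : List (List String) :=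
  let C := (grid.headD []).length
  let pad := C - 1          -- Source B: max(C-1, 0); Nat subtraction is exactly that
  let lens := grid.map (fun r => r.length + pad)
  let M := (PySem.List.min? lens (fun x => x)).getD 0   -- min(lens); lens is nonempty under Pre_
  (List.range M).map (fun (k : Nat) =>
    (PySem.List.enumerate grid).filterMap (fun p =>
      let j := PySem.Int.mod ((k : Int) - p.1) ((lens.getD p.1.toNat 0 : Nat) : Int)
      if j < (p.2.length : Int) then p.2[j.toNat]? else none))

-- ===== PRECONDITION & SPEC =====
-- Pre_ excludes exactly the inputs where Python A raises IndexError: the empty grid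
-- (grid[0]), and grids whose padding width len(grid[0])-1 is 0 while some later row is
-- empty (line.pop() from an empty list during rotation).
def Pre_build_diag_grid2 (grid : List (List String)) : Prop :=
  grid ≠ [] ∧ (2 ≤ (grid.headD []).length ∨ [] ∉ grid.tail)
instance (grid : List (List String)) : Decidable (Pre_build_diag_grid2 grid) := by
  unfold Pre_build_diag_grid2; infer_instance
def pvWitness_build_diag_grid2 : List (List String) := [["a", "b"], ["c", "d"]]

-- On a nonempty grid whose first row has at most one cell while some later row is empty,
-- A raises IndexError (pop from an empty list); B returns [].
def Raises_build_diag_grid2 (grid : List (List String)) : Prop :=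
  grid ≠ [] ∧ (grid.headD []).length ≤ 1 ∧ [] ∈ grid.tail
instance (grid : List (List String)) : Decidable (Raises_build_diag_grid2 grid) := by
  unfold Raises_build_diag_grid2; infer_instance
def pvRaiseWitness_build_diag_grid2 : List (List String) := [["a"], []]
def pvRaiseWitnessOut_build_diag_grid2 : List (List String) := []

def Spec_build_diag_grid2 (grid : List (List String)) (out : List (List String)) : Prop := out = build_diag_grid2_alt grid
instance (grid : List (List String)) (out : List (List String)) : Decidable (Spec_build_diag_grid2 grid out) := by unfold Spec_build_diag_grid2; infer_instance

-- ===== CLAIM (what is proved, stated in full; the proofs are below) =====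
def Claim_equal_build_diag_grid2 : Prop := ∀ (grid : List (List String)), Dom_build_diag_grid2 grid → Pre_build_diag_grid2 grid → Spec_build_diag_grid2 grid (build_diag_grid2 grid)
def Claim_raises_build_diag_grid2 : Prop := (∀ (grid : List (List String)), Dom_build_diag_grid2 grid → Raises_build_diag_grid2 grid → ¬ Pre_build_diag_grid2 grid) ∧ (Dom_build_diag_grid2 (pvRaiseWitness_build_diag_grid2) ∧ Raises_build_diag_grid2 (pvRaiseWitness_build_diag_grid2) ∧ build_diag_grid2_alt (pvRaiseWitness_build_diag_grid2) = pvRaiseWitnessOut_build_diag_grid2)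

-- ===== LEMMAS AND PROOFS =====

theorem pvRot1_length {α : Type} (l : List α) : (pvRot1 l).length = l.length := by
  unfold pvRot1
  cases h : l.getLast? with
  | none => rfl
  | some x =>
    have hne : l ≠ [] := by rintro rfl; simp at h
    simp [List.length_dropLast]
    have : 0 < l.length := List.length_pos_iff.mpr hne
    omega

theorem pvRot1_iter_length {α : Type} (t : Nat) (l : List α) :
    (pvRot1^[t] l).length = l.length := by
  induction t with
  | zero => rfl
  | succ t ih => rw [Function.iterate_succ_apply', pvRot1_length, ih]

-- indexing a single right-rotation of A's inner loop
theorem pvRot1_getElem? {α : Type} (l : List α) (k : Nat) (hk : k < l.length) :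
    (pvRot1 l)[k]? = l[(k + (l.length - 1)) % l.length]? := by
  have hne : l ≠ [] := by rintro rfl; simp at hk
  have hpos : 0 < l.length := List.length_pos_iff.mpr hne
  unfold pvRot1
  rw [List.getLast?_eq_some_getLast hne]
  cases k with
  | zero =>
    have : (0 + (l.length - 1)) % l.length = l.length - 1 := by
      rw [Nat.zero_add, Nat.mod_eq_of_lt (by omega)]
    rw [this]
    simp only [List.getElem?_cons_zero]
    rw [List.getLast_eq_getElem]
    simp
  | succ j =>
    have hj : j + 1 < l.length := hk
    have : (j + 1 + (l.length - 1)) % l.length = j := by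
      have h1 : j + 1 + (l.length - 1) = j + l.length := by omega
      rw [h1, Nat.add_mod_right, Nat.mod_eq_of_lt (by omega)]
    rw [this]
    simp only [List.getElem?_cons_succ]
    simp [List.getElem?_dropLast]
    omega

-- indexing t right-rotations
theorem pvRot1_iter_getElem? {α : Type} (t k : Nat) (l : List α) (hk : k < l.length) :
    (pvRot1^[t] l)[k]? = l[(k + t * (l.length - 1)) % l.length]? := by
  induction t generalizing k with
  | zero => simp [Nat.mod_eq_of_lt hk]
  | succ t ih =>
    have hpos : 0 < l.length := by omega
    rw [Function.iterate_succ_apply', pvRot1_getElem? _ _ (by rw [pvRot1_iter_length]; exact hk),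
        pvRot1_iter_length]
    rw [ih _ (Nat.mod_lt _ hpos)]
    congr 1
    rw [Nat.mod_add_mod]
    congr 1
    ring

theorem pvPad_length (c : Nat) (r : List String) :
    (pvPad c r).length = r.length + (c - 1) := by
  simp [pvPad]

-- the padded row, indexed and stripped of the padding marker, is just the original row's lookup
theorem pvPad_getElem?_bind (c : Nat) (r : List String) (j : Nat) :
    ((pvPad c r)[j]?).bind id = r[j]? := by
  unfold pvPad
  rcases Nat.lt_or_ge j r.length with h | h
  · rw [List.getElem?_append_left (by simpa using h)]
    simp [List.getElem?_eq_getElem h]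
  · rw [List.getElem?_append_right (by simpa using h)]
    simp [List.getElem?_replicate, List.getElem?_eq_none h]

theorem enumerate_map {α β : Type} (f : α → β) (xs : List α) (s : Int) :
    PySem.List.enumerate (xs.map f) s = (PySem.List.enumerate xs s).map (fun p => (p.1, f p.2)) := by
  induction xs generalizing s with
  | nil => simp [PySem.List.enumerate_nil]
  | cons x t ih => simp [PySem.List.enumerate_cons, ih]

theorem build_diag_grid2_eq_alt (grid : List (List String)) :
    build_diag_grid2 grid = build_diag_grid2_alt grid := by
  cases grid with
  | nil => rfl
  | cons g0 gs =>
    simp only [build_diag_grid2, build_diag_grid2_alt, List.headD_cons]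
    set C := g0.length with hC
    set g : List (List String) := g0 :: gs with hg
    set lens : List Nat := g.map (fun r => r.length + (C - 1)) with hlens
    set M : Nat := (gs.map (fun r => r.length + (C - 1))).foldl min (g0.length + (C - 1)) with hM
    have hlensc : lens = (g0.length + (C - 1)) :: gs.map (fun r => r.length + (C - 1)) := by
      simp [hlens, hg]
    -- the two minima agree
    have hMb : (PySem.List.min? lens (fun x => x)).getD 0 = M := by
      rw [hlensc, PySem.List.min?_id_cons]; rfl
    have hmin : ∀ y ∈ lens, M ≤ y := by
      intro y hy
      have := PySem.List.min?_isMin (xs := lens) (key := fun x => x)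
        (by rw [hlensc, PySem.List.min?_id_cons]) y hy
      simpa using this
    -- A's rows, re-expressed over enumerate grid
    have hdiag : (PySem.List.enumerate (g.map (pvPad C))).map (fun p => pvRot1^[p.1.toNat] p.2)
        = (PySem.List.enumerate g).map (fun p => pvRot1^[p.1.toNat] (pvPad C p.2)) := by
      rw [enumerate_map, List.map_map]; rfl
    have hlen : (((PySem.List.enumerate g).map (fun p => pvRot1^[p.1.toNat] (pvPad C p.2))).map
        List.length) = lens := by
      rw [List.map_map]
      have h2 : (PySem.List.enumerate g).map ((fun r => r.length + (C - 1)) ∘ (fun p : Int × List String => p.2))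
          = lens := by
        rw [hlens]
        conv_rhs => rw [← PySem.List.map_snd_enumerate g 0]
        rw [List.map_map]
      rw [← h2]
      apply List.map_congr_left
      intro p _
      simp [pvRot1_iter_length, pvPad_length]
    have hMa : ((((PySem.List.enumerate g).map (fun p => pvRot1^[p.1.toNat] (pvPad C p.2))).map
        List.length)).min? = some M := by
      rw [hlen, hlensc]
      simp [List.min?, hM]
    rw [hdiag, hMb]
    unfold pvZipStar
    rw [hMa]
    rw [List.map_map]
    apply List.map_congr_left
    intro k hk
    have hkM : k < M := List.mem_range.mp hk
    simp only [Function.comp]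
    rw [List.filterMap_filterMap, List.filterMap_map]
    apply List.filterMap_congr
    intro p hp
    obtain ⟨i, hi, rfl⟩ := (PySem.List.mem_enumerate_iff g 0 p).mp hp
    simp only [Function.comp_apply, Int.zero_add, Int.toNat_natCast]
    set r : List String := g[i] with hr
    set mi : Nat := r.length + (C - 1) with hmi
    have hmem : mi ∈ lens := by
      rw [hlens]
      exact List.mem_map.mpr ⟨r, List.getElem_mem hi, rfl⟩
    have hkmi : k < mi := lt_of_lt_of_le hkM (hmin _ hmem)
    have hmipos : 0 < mi := by omega
    have hgd : lens.getD i 0 = mi := by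
      rw [hlens, List.getD_eq_getElem?_getD, List.getElem?_map, List.getElem?_eq_getElem hi]
      rfl
    set J : Nat := (k + i * (mi - 1)) % mi with hJ
    -- A's cell at (diagonal k, row i)
    have hA : ((pvRot1^[i] (pvPad C r))[k]?).bind id = r[J]? := by
      rw [pvRot1_iter_getElem? _ _ _ (by rw [pvPad_length]; exact hkmi), pvPad_length,
        pvPad_getElem?_bind]
    -- B's modular source index equals A's rotated index
    have hmod : PySem.Int.mod ((k : Int) - (i : Int)) ((mi : Nat) : Int) = (J : Int) := by
      rw [PySem.Int.mod_eq_emod_of_pos (by exact_mod_cast hmipos)]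
      have hcast : ((k + i * (mi - 1) : Nat) : Int) = ((k : Int) - i) + i * mi := by
        push_cast [Nat.cast_sub hmipos]
        ring
      calc ((k : Int) - i) % mi = (((k : Int) - i) + i * mi) % mi := by
            simp [Int.add_mul_emod_self_right]
        _ = ((k + i * (mi - 1) : Nat) : Int) % ((mi : Nat) : Int) := by rw [hcast]
        _ = (J : Int) := by rw [hJ, Int.natCast_mod]
    rw [hA, hgd, hmod]
    by_cases hJr : J < r.length
    · simp [hJr]
    · have h1 : ¬ ((J : Int) < (r.length : Int)) := by exact_mod_cast hJr
      rw [if_neg h1, List.getElem?_eq_none (by omega)]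

-- ===== VERDICT (by name: the statement is the Claim_ definition above) =====
theorem build_diag_grid2_spec : Claim_equal_build_diag_grid2 := by
  intro grid _ _
  unfold Spec_build_diag_grid2
  exact build_diag_grid2_eq_alt grid

@[simp] theorem build_diag_grid2_raises : Claim_raises_build_diag_grid2 := by
  unfold Claim_raises_build_diag_grid2
  exact ⟨by
    intro grid _ hr hp
    rcases hr with ⟨_, h1, h2⟩
    rcases hp with ⟨_, h3 | h3⟩
    · omega
    · exact h3 h2, by decide⟩
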